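-- pv_equiv track=rewrite | github.com/garyrayat/agent_jobby | jobby.py | apply_priority
-- ===== SOURCE A (Python) =====
-- def apply_priority(job):
--     loc = job.get("location","").lower()
--     if "austin" in loc: return 0
--     if any(x in loc for x in ["dallas","houston","san antonio"]): return 1
--     if any(x in loc for x in [", tx","texas"]): return 2
--     if any(x in loc for x in ["remote","united states","usa","anywhere","nationwide"]): return 3
--     if any(x in loc for x in ["new york","brooklyn","manhattan"]): return 4
--     if any(x in loc for x in ["san francisco","mountain view","palo alto","sunnyvale","santa clara"]): return 5
--     if any(x in loc for x in ["seattle","bellevue","redmond"]): return 6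
--     if any(x in loc for x in ["boston","cambridge"]): return 7
--     if "chicago" in loc: return 8
--     if any(x in loc for x in ["washington","mclean","arlington"]): return 9
--     if any(x in loc for x in ["connecticut","stamford","greenwich"]): return 10
--     if any(x in loc for x in ["los angeles","irvine","san diego"]): return 11
--     return 12
-- ===== SOURCE B (Python) =====
-- def apply_priority(job):
--     PRIORITY = {
--         "austin": 0,
--         "dallas": 1, "houston": 1, "san antonio": 1,
--         ", tx": 2, "texas": 2,
--         "remote": 3, "united states": 3, "usa": 3, "anywhere": 3, "nationwide": 3,
--         "new york": 4, "brooklyn": 4, "manhattan": 4,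
--         "san francisco": 5, "mountain view": 5, "palo alto": 5, "sunnyvale": 5, "santa clara": 5,
--         "seattle": 6, "bellevue": 6, "redmond": 6,
--         "boston": 7, "cambridge": 7,
--         "chicago": 8,
--         "washington": 9, "mclean": 9, "arlington": 9,
--         "connecticut": 10, "stamford": 10, "greenwich": 10,
--         "los angeles": 11, "irvine": 11, "san diego": 11,
--     }
--     loc = job.get("location", "").lower()
--     best = 12
--     for kw, p in PRIORITY.items():
--         if kw in loc:
--             best = min(best, p)
--     return best
-- ===== Notes on version B (the rewrite author's own statement) =====
-- stated objective: simpler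
-- what changed: Replaces the 13-branch early-return if-chain by a single keyword-to-priority table scanned once while accumulating the minimum matching priority (correct because A's branches are in increasing priority order).
import Mathlib
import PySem

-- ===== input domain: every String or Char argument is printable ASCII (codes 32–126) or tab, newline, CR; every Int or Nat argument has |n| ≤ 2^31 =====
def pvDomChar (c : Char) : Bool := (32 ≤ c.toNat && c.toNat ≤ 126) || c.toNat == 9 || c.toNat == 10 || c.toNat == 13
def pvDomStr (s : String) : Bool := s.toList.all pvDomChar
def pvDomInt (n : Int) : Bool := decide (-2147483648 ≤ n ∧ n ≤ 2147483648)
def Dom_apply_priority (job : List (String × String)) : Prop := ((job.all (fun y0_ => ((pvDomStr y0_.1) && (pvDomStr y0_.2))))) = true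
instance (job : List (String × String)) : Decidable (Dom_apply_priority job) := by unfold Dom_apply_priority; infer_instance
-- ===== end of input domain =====

-- B replaces A's 13-branch early-return if-chain by one keyword→priority table scanned once,
-- accumulating the minimum matching priority (valid since A's branches are in increasing priority order): simpler, data-driven.


-- ===== PORT A =====
def apply_priority (job : List (String × String)) : Int :=
  let loc := PySem.Str.lower ((PySem.Dict.mk job).getD "location" "")
  if PySem.Str.isIn "austin" loc then 0
  else if (["dallas","houston","san antonio"].any (fun x => PySem.Str.isIn x loc)) then 1
  else if ([", tx","texas"].any (fun x => PySem.Str.isIn x loc)) then 2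
  else if (["remote","united states","usa","anywhere","nationwide"].any (fun x => PySem.Str.isIn x loc)) then 3
  else if (["new york","brooklyn","manhattan"].any (fun x => PySem.Str.isIn x loc)) then 4
  else if (["san francisco","mountain view","palo alto","sunnyvale","santa clara"].any (fun x => PySem.Str.isIn x loc)) then 5
  else if (["seattle","bellevue","redmond"].any (fun x => PySem.Str.isIn x loc)) then 6
  else if (["boston","cambridge"].any (fun x => PySem.Str.isIn x loc)) then 7
  else if PySem.Str.isIn "chicago" loc then 8
  else if (["washington","mclean","arlington"].any (fun x => PySem.Str.isIn x loc)) then 9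
  else if (["connecticut","stamford","greenwich"].any (fun x => PySem.Str.isIn x loc)) then 10
  else if (["los angeles","irvine","san diego"].any (fun x => PySem.Str.isIn x loc)) then 11
  else 12

-- ===== PORT B =====
-- the keyword → priority table of Source B, in its insertion order
def pvPriorityTable : List (String × Int) :=
  [("austin", 0),
   ("dallas", 1), ("houston", 1), ("san antonio", 1),
   (", tx", 2), ("texas", 2),
   ("remote", 3), ("united states", 3), ("usa", 3), ("anywhere", 3), ("nationwide", 3),
   ("new york", 4), ("brooklyn", 4), ("manhattan", 4),
   ("san francisco", 5), ("mountain view", 5), ("palo alto", 5), ("sunnyvale", 5), ("santa clara", 5),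
   ("seattle", 6), ("bellevue", 6), ("redmond", 6),
   ("boston", 7), ("cambridge", 7),
   ("chicago", 8),
   ("washington", 9), ("mclean", 9), ("arlington", 9),
   ("connecticut", 10), ("stamford", 10), ("greenwich", 10),
   ("los angeles", 11), ("irvine", 11), ("san diego", 11)]

def apply_priority_alt (job : List (String × String)) : Int :=
  let loc := PySem.Str.lower ((PySem.Dict.mk job).getD "location" "")
  pvPriorityTable.foldl (fun best kp => if PySem.Str.isIn kp.1 loc then min best kp.2 else best) 12

-- ===== PRECONDITION & SPEC =====
def Spec_apply_priority (job : List (String × String)) (out : Int) : Prop := out = apply_priority_alt job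
instance (job : List (String × String)) (out : Int) : Decidable (Spec_apply_priority job out) := by unfold Spec_apply_priority; infer_instance

-- ===== CLAIM (what is proved, stated in full; the proofs are below) =====
def Claim_equal_apply_priority : Prop := ∀ (job : List (String × String)), Dom_apply_priority job → Spec_apply_priority job (apply_priority job)

-- ===== LEMMAS AND PROOFS =====

-- A's keyword groups with their priorities, in branch order
def pvGroups : List (List String × Int) :=
  [(["austin"], 0),
   (["dallas","houston","san antonio"], 1),
   ([", tx","texas"], 2),
   (["remote","united states","usa","anywhere","nationwide"], 3),
   (["new york","brooklyn","manhattan"], 4),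
   (["san francisco","mountain view","palo alto","sunnyvale","santa clara"], 5),
   (["seattle","bellevue","redmond"], 6),
   (["boston","cambridge"], 7),
   (["chicago"], 8),
   (["washington","mclean","arlington"], 9),
   (["connecticut","stamford","greenwich"], 10),
   (["los angeles","irvine","san diego"], 11)]

def pvStep (loc : String) (best : Int) (kp : String × Int) : Int :=
  if PySem.Str.isIn kp.1 loc then min best kp.2 else best

def pvGStep (loc : String) (best : Int) (g : List String × Int) : Int :=
  if g.1.any (fun x => PySem.Str.isIn x loc) then min best g.2 else best

-- A as a first-match scan over the group list
def pvFirst (loc : String) : List (List String × Int) → Int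
  | [] => 12
  | g :: rest => if g.1.any (fun x => PySem.Str.isIn x loc) then g.2 else pvFirst loc rest

lemma pv_table_flat : pvPriorityTable = pvGroups.flatMap (fun g => g.1.map (fun k => (k, g.2))) := by
  decide

lemma pv_fold_group (loc : String) (p : Int) (ks : List String) (a : Int) :
    (ks.map (fun k => (k, p))).foldl (pvStep loc) a
      = if ks.any (fun x => PySem.Str.isIn x loc) then min a p else a := by
  induction ks generalizing a with
  | nil => simp
  | cons k ks ih =>
    simp only [List.map_cons, List.foldl_cons, List.any_cons, pvStep]
    by_cases h : PySem.Str.isIn k loc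
    · simp only [h, if_true, Bool.true_or, ih]
      by_cases h2 : ks.any (fun x => PySem.Str.isIn x loc)
      · simp only [h2, if_true, min_assoc, min_self]
      · simp only [h2, if_false, Bool.false_eq_true]
    · simp only [h, if_false, Bool.false_or, ih, Bool.false_eq_true]

lemma pv_fold_flat (loc : String) (gs : List (List String × Int)) (a : Int) :
    (gs.flatMap (fun g => g.1.map (fun k => (k, g.2)))).foldl (pvStep loc) a
      = gs.foldl (pvGStep loc) a := by
  induction gs generalizing a with
  | nil => rfl
  | cons g gs ih =>
    simp only [List.flatMap_cons, List.foldl_append, List.foldl_cons, ih, pv_fold_group, pvGStep]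

lemma pv_fold_const (loc : String) (gs : List (List String × Int)) (a : Int)
    (h : ∀ g ∈ gs, a ≤ g.2) : gs.foldl (pvGStep loc) a = a := by
  induction gs with
  | nil => rfl
  | cons g gs ih =>
    rw [List.foldl_cons]
    have hstep : pvGStep loc a g = a := by
      unfold pvGStep; split
      · exact min_eq_left (h g (List.mem_cons_self))
      · rfl
    rw [hstep]
    exact ih (fun g hg => h g (List.mem_cons_of_mem _ hg))

lemma pv_fold_first (loc : String) (gs : List (List String × Int)) (a : Int)
    (hsort : gs.Pairwise (fun g h => g.2 ≤ h.2)) (hle : ∀ g ∈ gs, g.2 ≤ a) :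
    gs.foldl (pvGStep loc) a
      = if (∃ g ∈ gs, (g.1.any fun x => PySem.Str.isIn x loc) = true) then pvFirst loc gs else a := by
  induction gs generalizing a with
  | nil => simp
  | cons g gs ih =>
    rcases List.pairwise_cons.mp hsort with ⟨hg, hsort'⟩
    rw [List.foldl_cons]
    have hfirst : pvFirst loc (g :: gs)
        = if (g.1.any fun x => PySem.Str.isIn x loc) = true then g.2 else pvFirst loc gs := rfl
    by_cases hc : (g.1.any fun x => PySem.Str.isIn x loc) = true
    · have hstep : pvGStep loc a g = min a g.2 := by unfold pvGStep; rw [if_pos hc]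
      rw [hstep, min_eq_right (hle g (List.mem_cons_self)), pv_fold_const loc gs g.2 hg,
        hfirst, if_pos hc, if_pos ⟨g, List.mem_cons_self, hc⟩]
    · have hstep : pvGStep loc a g = a := by unfold pvGStep; rw [if_neg hc]
      rw [hstep, ih a hsort' (fun h hh => hle h (List.mem_cons_of_mem _ hh)), hfirst, if_neg hc]
      by_cases he : ∃ g' ∈ gs, (g'.1.any fun x => PySem.Str.isIn x loc) = true
      · rcases he with ⟨g', hg', hx⟩
        rw [if_pos ⟨g', hg', hx⟩, if_pos ⟨g', List.mem_cons_of_mem _ hg', hx⟩]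
      · rw [if_neg he, if_neg (by
          rintro ⟨g', hg', hx⟩
          rcases List.mem_cons.mp hg' with rfl | hmem
          · exact hc hx
          · exact he ⟨g', hmem, hx⟩)]

-- ===== VERDICT (by name: the statement is the Claim_ definition above) =====
theorem apply_priority_spec : Claim_equal_apply_priority := by
  intro job _
  unfold Spec_apply_priority apply_priority apply_priority_alt
  set loc := PySem.Str.lower ((PySem.Dict.mk job).getD "location" "") with hl
  have hB : pvPriorityTable.foldl
      (fun best (kp : String × Int) => if PySem.Str.isIn kp.1 loc then min best kp.2 else best) 12
      = if (∃ g ∈ pvGroups, (g.1.any fun x => PySem.Str.isIn x loc) = true)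
          then pvFirst loc pvGroups else 12 := by
    rw [show (fun best (kp : String × Int) => if PySem.Str.isIn kp.1 loc then min best kp.2 else best)
          = pvStep loc from rfl,
      pv_table_flat, pv_fold_flat,
      pv_fold_first loc pvGroups 12 (by decide) (by decide)]
  rw [hB]
  by_cases he : ∃ g ∈ pvGroups, (g.1.any fun x => PySem.Str.isIn x loc) = true
  · rw [if_pos he]
    simp only [pvFirst, pvGroups, List.any_cons, List.any_nil, Bool.or_false]
  · rw [if_neg he]
    have hall : ∀ g ∈ pvGroups, (g.1.any fun x => PySem.Str.isIn x loc) = false := by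
      intro g hg
      exact Bool.eq_false_iff.mpr (fun hx => he ⟨g, hg, hx⟩)
    simp only [pvGroups, List.mem_cons, forall_eq_or_imp, List.any_cons, List.any_nil,
      Bool.or_false, Bool.or_eq_false_iff, List.not_mem_nil, false_implies, implies_true,
      and_true] at hall
    simp only [List.any_cons, List.any_nil, Bool.or_false]
    simp only [hall.1, hall.2.1.1, hall.2.1.2.1, hall.2.1.2.2, hall.2.2.1.1, hall.2.2.1.2,
      hall.2.2.2.1.1, hall.2.2.2.1.2.1, hall.2.2.2.1.2.2.1, hall.2.2.2.1.2.2.2.1, hall.2.2.2.1.2.2.2.2,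
      hall.2.2.2.2.1.1, hall.2.2.2.2.1.2.1, hall.2.2.2.2.1.2.2,
      hall.2.2.2.2.2.1.1, hall.2.2.2.2.2.1.2.1, hall.2.2.2.2.2.1.2.2.1, hall.2.2.2.2.2.1.2.2.2.1, hall.2.2.2.2.2.1.2.2.2.2,
      hall.2.2.2.2.2.2.1.1, hall.2.2.2.2.2.2.1.2.1, hall.2.2.2.2.2.2.1.2.2,
      hall.2.2.2.2.2.2.2.1.1, hall.2.2.2.2.2.2.2.1.2,
      hall.2.2.2.2.2.2.2.2.1,
      hall.2.2.2.2.2.2.2.2.2.1.1, hall.2.2.2.2.2.2.2.2.2.1.2.1, hall.2.2.2.2.2.2.2.2.2.1.2.2,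
      hall.2.2.2.2.2.2.2.2.2.2.1.1, hall.2.2.2.2.2.2.2.2.2.2.1.2.1, hall.2.2.2.2.2.2.2.2.2.2.1.2.2,
      hall.2.2.2.2.2.2.2.2.2.2.2.1, hall.2.2.2.2.2.2.2.2.2.2.2.2.1, hall.2.2.2.2.2.2.2.2.2.2.2.2.2,
      Bool.or_self, Bool.false_eq_true, if_false]
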